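-- pv_equiv track=rewrite | github.com/chengc823/Thesis | naslib/search_spaces/nasbench201/conversions.py | convert_op_indices_to_str
-- ===== SOURCE A (Python) =====
-- OP_NAMES_NB201 = ['skip_connect', 'none', 'nor_conv_3x3', 'nor_conv_1x1', 'avg_pool_3x3']
--
-- EDGE_LIST = ((1, 2), (1, 3), (1, 4), (2, 3), (2, 4), (3, 4))
--
-- def convert_op_indices_to_str(op_indices):
--     edge_op_dict = {
--         edge: OP_NAMES_NB201[op] for edge, op in zip(EDGE_LIST, op_indices)
--     }
--
--     op_edge_list = [
--         "{}~{}".format(edge_op_dict[(i, j)], i - 1)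
--         for i, j in sorted(edge_op_dict, key=lambda x: x[1])
--     ]
--
--     return "|{}|+|{}|{}|+|{}|{}|{}|".format(*op_edge_list)
-- ===== SOURCE B (Python) =====
-- OP_NAMES_NB201 = ['skip_connect', 'none', 'nor_conv_3x3', 'nor_conv_1x1', 'avg_pool_3x3']
--
-- def convert_op_indices_to_str(op_indices):
--     # edges sorted (stably) by target node are positions positions 0,1,3,2,4,5
--     names = [OP_NAMES_NB201[op_indices[k]] for k in (0, 1, 3, 2, 4, 5)]
--     return "|{}~0|+|{}~0|{}~1|+|{}~0|{}~1|{}~2|".format(*names)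
-- ===== Notes on version B (the rewrite author's own statement) =====
-- stated objective: simpler
-- what changed: Replaces the edge->op dict build plus a key-sort and per-edge string formatting by a direct closed-form template substitution using the precomputed sorted-by-target edge order positions 0,1,3,2,4,5.
import Mathlib
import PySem

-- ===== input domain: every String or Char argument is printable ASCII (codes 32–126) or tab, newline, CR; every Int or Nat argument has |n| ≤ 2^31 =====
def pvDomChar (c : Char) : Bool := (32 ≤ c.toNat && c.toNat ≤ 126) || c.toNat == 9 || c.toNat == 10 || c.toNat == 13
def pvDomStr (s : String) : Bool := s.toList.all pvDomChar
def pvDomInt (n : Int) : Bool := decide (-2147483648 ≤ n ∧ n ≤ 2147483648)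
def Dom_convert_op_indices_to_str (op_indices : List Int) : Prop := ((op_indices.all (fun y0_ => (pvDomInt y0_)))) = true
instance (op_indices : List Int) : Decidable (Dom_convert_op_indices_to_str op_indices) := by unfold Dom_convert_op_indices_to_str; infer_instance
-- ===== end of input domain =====

-- B replaces A's dict-build + sort + per-edge formatting by a direct closed-form
-- template substitution in the precomputed sorted-by-target edge order (simpler, same cost).

def pvOP_NAMES_NB201 : List String :=
  ["skip_connect", "none", "nor_conv_3x3", "nor_conv_1x1", "avg_pool_3x3"]

def pvEDGE_LIST : List (Int × Int) := [(1,2), (1,3), (1,4), (2,3), (2,4), (3,4)]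

-- ===== PORT A =====
def convert_op_indices_to_str (op_indices : List Int) : String :=
  let edge_op_dict : PySem.Dict (Int × Int) String :=
    (List.zip pvEDGE_LIST op_indices).foldl
      (fun d p => d.insert p.1 ((PySem.List.pyGet? pvOP_NAMES_NB201 p.2).getD ""))
      PySem.Dict.empty
  let op_edge_list : List String :=
    (PySem.List.sorted edge_op_dict.keys (fun x => x.2) false).map
      (fun ij => PySem.Str.join "" [edge_op_dict.getD ij "", "~", PySem.Int.toStr (ij.1 - 1)])
  PySem.Str.join ""
    ["|", (PySem.List.pyGet? op_edge_list 0).getD "", "|+|",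
          (PySem.List.pyGet? op_edge_list 1).getD "", "|",
          (PySem.List.pyGet? op_edge_list 2).getD "", "|+|",
          (PySem.List.pyGet? op_edge_list 3).getD "", "|",
          (PySem.List.pyGet? op_edge_list 4).getD "", "|",
          (PySem.List.pyGet? op_edge_list 5).getD "", "|"]

-- ===== PORT B =====
def convert_op_indices_to_str_alt (op_indices : List Int) : String :=
  let names : List String :=
    ([0, 1, 3, 2, 4, 5] : List Int).map
      (fun k => (((PySem.List.pyGet? op_indices k).bind
                   (fun op => PySem.List.pyGet? pvOP_NAMES_NB201 op)).getD ""))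
  PySem.Str.join ""
    ["|", (PySem.List.pyGet? names 0).getD "", "~0|+|",
          (PySem.List.pyGet? names 1).getD "", "~0|",
          (PySem.List.pyGet? names 2).getD "", "~1|+|",
          (PySem.List.pyGet? names 3).getD "", "~0|",
          (PySem.List.pyGet? names 4).getD "", "~1|",
          (PySem.List.pyGet? names 5).getD "", "~2|"]

-- ===== PRECONDITION & SPEC =====
-- Pre_: exactly the inputs where A returns normally — at least 6 op indices (else the
-- format/dict lookup raises) and each of the first 6 a valid index into the 5 op names
-- (else OP_NAMES_NB201[op] raises IndexError; Python accepts -5..4 via wraparound).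
def Pre_convert_op_indices_to_str (op_indices : List Int) : Prop :=
  6 ≤ op_indices.length ∧ ∀ x ∈ op_indices.take 6, -5 ≤ x ∧ x < 5
instance (op_indices : List Int) : Decidable (Pre_convert_op_indices_to_str op_indices) := by
  unfold Pre_convert_op_indices_to_str; infer_instance

def pvWitness_convert_op_indices_to_str : List Int := [0, 1, 2, 3, 4, 0]

def Spec_convert_op_indices_to_str (op_indices : List Int) (out : String) : Prop :=
  out = convert_op_indices_to_str_alt op_indices
instance (op_indices : List Int) (out : String) : Decidable (Spec_convert_op_indices_to_str op_indices out) := by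
  unfold Spec_convert_op_indices_to_str; infer_instance

-- ===== CLAIM (what is proved, stated in full; the proofs are below) =====
def Claim_equal_convert_op_indices_to_str : Prop :=
  ∀ (op_indices : List Int), Dom_convert_op_indices_to_str op_indices →
    Pre_convert_op_indices_to_str op_indices →
    Spec_convert_op_indices_to_str op_indices (convert_op_indices_to_str op_indices)

-- ===== LEMMAS AND PROOFS =====

-- The two ports agree on every list with at least 6 elements: both sides reduce to the
-- same character list, with each op name appearing as '(pyGet? pvOP_NAMES_NB201 x).getD ""'.
theorem convert_eq_of_six (a b c d e f : Int) (t : List Int) :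
    convert_op_indices_to_str (a :: b :: c :: d :: e :: f :: t)
      = convert_op_indices_to_str_alt (a :: b :: c :: d :: e :: f :: t) := by
  simp [convert_op_indices_to_str, convert_op_indices_to_str_alt,
        pvEDGE_LIST, pvOP_NAMES_NB201, PySem.List.pyGet?, PySem.List.pyIdx?,
        PySem.List.sorted, PySem.List.insertBy, PySem.Dict.insert, PySem.Dict.getD,
        PySem.Dict.get?, PySem.Dict.keys, PySem.Dict.empty, PySem.Str.join,
        PySem.Chars.join, PySem.Int.toStr, PySem.Int.toChars,
        List.intercalate, Nat.toDigits, Nat.toDigitsCore, Nat.digitChar,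
        show (0:Int) ≤ (t.length:Int)+1+1+1+1+1 from by omega,
        show (1:Int) ≤ (t.length:Int)+1+1+1+1+1 from by omega,
        show (2:Int) ≤ (t.length:Int)+1+1+1+1+1 from by omega,
        show (3:Int) ≤ (t.length:Int)+1+1+1+1+1 from by omega,
        show (4:Int) ≤ (t.length:Int)+1+1+1+1+1 from by omega,
        show (5:Int) ≤ (t.length:Int)+1+1+1+1+1 from by omega]

-- ===== VERDICT (by name: the statement is the Claim_ definition above) =====
theorem convert_op_indices_to_str_spec : Claim_equal_convert_op_indices_to_str := by
  intro l _ hpre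
  obtain ⟨hlen, -⟩ := hpre
  match l, hlen with
  | a :: b :: c :: d :: e :: f :: t, _ =>
    exact convert_eq_of_six a b c d e f t
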